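-- pv_equiv track=rewrite | github.com/detroitnatif/EGR103F21 | lab12/AnagramFree.py | getMaximumSubset
-- ===== SOURCE A (Python) =====
-- def getMaximumSubset(words):
--     newarr = []
--     for i in words:
--         newarr.append(sorted(i))
--
--     newarr2 =[]
--     for j in newarr:
--         newarr2.append(str(j))
--     l = sorted(set(newarr2))
--     final = []
--     for h in range(len(l)):
--         final.append(0)
--
--     for idx, ele in enumerate(l):
--         for ide, el in enumerate(newarr2):
--             if ele == el:
--                 final[idx] += 1
--
--
--
--     fin = len(words)
--     return len(l)
-- ===== SOURCE B (Python) =====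
-- def getMaximumSubset(words):
--     sigs = sorted("".join(sorted(w)) for w in words)
--     count = 0
--     prev = None
--     for s in sigs:
--         if s != prev:
--             count += 1
--             prev = s
--     return count
-- ===== Notes on version B (the rewrite author's own statement) =====
-- stated objective: faster
-- what changed: A canonicalizes each word, builds a set of signature strings and runs an extra dead counting pass over all (distinct signature, signature) pairs before returning the set's size; B sorts the signature list once and counts group boundaries in a single adjacent-difference scan, eliminating both the set and the quadratic counting pass.
import Mathlib
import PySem

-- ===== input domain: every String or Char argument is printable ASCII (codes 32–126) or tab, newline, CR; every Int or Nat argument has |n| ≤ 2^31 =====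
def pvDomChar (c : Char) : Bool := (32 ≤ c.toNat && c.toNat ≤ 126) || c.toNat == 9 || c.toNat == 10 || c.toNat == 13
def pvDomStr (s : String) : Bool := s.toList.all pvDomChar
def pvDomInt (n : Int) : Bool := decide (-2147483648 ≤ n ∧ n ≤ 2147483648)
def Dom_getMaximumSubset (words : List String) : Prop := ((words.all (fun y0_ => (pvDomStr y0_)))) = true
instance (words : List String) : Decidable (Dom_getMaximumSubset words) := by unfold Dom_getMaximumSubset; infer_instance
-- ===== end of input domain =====

-- B replaces A's set-based dedup (plus a dead per-signature counting pass) with a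
-- sort-then-adjacent-scan count of distinct anagram signatures; same return value.


-- ===== PORT A =====
-- Python's repr of a single character, exact on printable ASCII plus tab/newline/CR
-- (the stated Dom); hand-ported because PySem has no repr primitive.
def pyReprChar (c : Char) : List Char :=
  if c = '\'' then ['"', '\'', '"']
  else if c = '\\' then ['\'', '\\', '\\', '\'']
  else if c = '\t' then ['\'', '\\', 't', '\'']
  else if c = '\n' then ['\'', '\\', 'n', '\'']
  else if c = '\r' then ['\'', '\\', 'r', '\'']
  else ['\'', c, '\'']

-- body of Python's str(list-of-chars) after the opening '[': elements separated by ", ", closed by ']'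
def pyReprCore : List Char → List Char
  | [] => [']']
  | c :: rest => pyReprChar c ++ (if rest = [] then [']'] else ',' :: ' ' :: pyReprCore rest)

-- Python's str(j) for j a list of single characters (exact on Dom characters)
def pyStrCharList (j : List Char) : String := String.ofList ('[' :: pyReprCore j)

def getMaximumSubset (words : List String) : Int :=
  let newarr := words.foldl (fun acc i => acc ++ [PySem.List.sorted i.toList (fun x => x) false]) []
  let newarr2 := newarr.foldl (fun acc j => acc ++ [pyStrCharList j]) []
  let l := PySem.List.sorted (PySem.Set.ofList newarr2) (fun x => x) false
  let final0 := (PySem.List.pyRange 0 (PySem.List.len l) 1).foldl (fun acc _ => acc ++ [(0 : Int)]) []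
  let _final := (PySem.List.enumerate l).foldl (fun fin p =>
      (PySem.List.enumerate newarr2).foldl (fun fin2 q =>
        if p.2 == q.2 then PySem.List.pySetD fin2 p.1 (PySem.List.pyGetD fin2 p.1 0 + 1) else fin2) fin) final0
  let _fin := PySem.List.len words
  PySem.List.len l

-- ===== PORT B =====
def getMaximumSubset_alt (words : List String) : Int :=
  let sigs := PySem.List.sorted (words.map (fun w => String.ofList (PySem.List.sorted w.toList (fun x => x) false))) (fun x => x) false
  (sigs.foldl (fun (st : Int × Option String) s => if st.2 = some s then st else (st.1 + 1, some s)) (0, none)).1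

-- ===== PRECONDITION & SPEC =====
def Spec_getMaximumSubset (words : List String) (out : Int) : Prop := out = getMaximumSubset_alt words
instance (words : List String) (out : Int) : Decidable (Spec_getMaximumSubset words out) := by unfold Spec_getMaximumSubset; infer_instance

-- ===== CLAIM (what is proved, stated in full; the proofs are below) =====
def Claim_equal_getMaximumSubset : Prop := ∀ (words : List String), Dom_getMaximumSubset words → Spec_getMaximumSubset words (getMaximumSubset words)

-- ===== LEMMAS AND PROOFS =====

-- the head repr determines the head character and the remainder
lemma pyReprChar_append_inj {c₁ c₂ : Char} {r₁ r₂ : List Char}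
    (h : pyReprChar c₁ ++ r₁ = pyReprChar c₂ ++ r₂) : c₁ = c₂ ∧ r₁ = r₂ := by
  unfold pyReprChar at h
  split_ifs at h <;> simp_all

lemma pyReprCore_ne_head (c : Char) (r rest : List Char) :
    pyReprChar c ++ rest ≠ ']' :: r := by
  unfold pyReprChar
  split_ifs <;> simp

lemma pyReprCore_inj : ∀ {l₁ l₂ : List Char}, pyReprCore l₁ = pyReprCore l₂ → l₁ = l₂ := by
  intro l₁
  induction l₁ with
  | nil =>
    intro l₂ h
    cases l₂ with
    | nil => rfl
    | cons c r =>
      exact absurd h.symm (pyReprCore_ne_head c _ _)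
  | cons c r ih =>
    intro l₂ h
    cases l₂ with
    | nil =>
      exact absurd h (pyReprCore_ne_head c _ _)
    | cons c₂ r₂ =>
      simp only [pyReprCore] at h
      obtain ⟨hc, ht⟩ := pyReprChar_append_inj h
      subst hc
      by_cases h1 : r = [] <;> by_cases h2 : r₂ = [] <;> simp [h1, h2] at ht ⊢
      exact ih ht

lemma pyStrCharList_inj : Function.Injective pyStrCharList := by
  intro a b h
  simp only [pyStrCharList, String.ofList_inj, List.cons.injEq, true_and] at h
  exact pyReprCore_inj h

-- the adjacent scan over a sorted list counts its distinct elements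
lemma pvScan_some {l : List String} (hp : l.Pairwise (· ≤ ·)) :
    ∀ (c : Int) (a : String), (∀ x ∈ l, a ≤ x) →
      (l.foldl (fun (st : Int × Option String) s => if st.2 = some s then st else (st.1 + 1, some s)) (c, some a)).1
        = c + (l.toFinset.erase a).card := by
  induction l with
  | nil => intro c a _; simp
  | cons x xs ih =>
    intro c a hall
    have hx := List.pairwise_cons.mp hp
    by_cases hxa : x = a
    · subst hxa
      have hset : (x :: xs).toFinset.erase x = xs.toFinset.erase x := by
        ext y
        simp only [List.toFinset_cons, Finset.mem_erase, Finset.mem_insert, List.mem_toFinset]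
        tauto
      rw [List.foldl_cons, if_pos rfl, ih hx.2 c x hx.1, hset]
    · rw [List.foldl_cons, if_neg (by simpa using fun h : a = x => hxa h.symm),
        ih hx.2 (c + 1) x hx.1]
      have hanot : a ∉ (x :: xs).toFinset := by
        simp only [List.toFinset_cons, Finset.mem_insert, List.mem_toFinset]
        rintro (h | h)
        · exact hxa h.symm
        · exact hxa (le_antisymm (hx.1 a h) (hall x (by simp)))
      rw [Finset.erase_eq_of_notMem hanot]
      simp only [List.toFinset_cons]
      by_cases hmem : x ∈ xs.toFinset
      · rw [Finset.insert_eq_self.mpr hmem, Finset.card_erase_of_mem hmem]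
        have : 1 ≤ xs.toFinset.card := Finset.card_pos.mpr ⟨x, hmem⟩
        omega
      · rw [Finset.card_insert_of_notMem hmem, Finset.erase_eq_of_notMem hmem]
        push_cast
        omega

lemma pvScan_none {l : List String} (hp : l.Pairwise (· ≤ ·)) :
    (l.foldl (fun (st : Int × Option String) s => if st.2 = some s then st else (st.1 + 1, some s)) (0, none)).1
      = l.toFinset.card := by
  cases l with
  | nil => simp
  | cons x xs =>
    have hx := List.pairwise_cons.mp hp
    rw [List.foldl_cons, if_neg (by simp), zero_add, pvScan_some hx.2 1 x hx.1]
    simp only [List.toFinset_cons]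
    by_cases hmem : x ∈ xs.toFinset
    · rw [Finset.insert_eq_self.mpr hmem, Finset.card_erase_of_mem hmem]
      have : 1 ≤ xs.toFinset.card := Finset.card_pos.mpr ⟨x, hmem⟩
      omega
    · rw [Finset.card_insert_of_notMem hmem, Finset.erase_eq_of_notMem hmem]
      push_cast
      omega

lemma toFinset_ofList {α : Type} [DecidableEq α] (xs : List α) :
    (PySem.Set.ofList xs).toFinset = xs.toFinset := by
  ext a
  simp [List.mem_toFinset, PySem.Set.mem_ofList]

-- distinct count is invariant under an injective post-map of the keys
lemma card_map_inj {α β : Type} [DecidableEq α] [DecidableEq β] (f : α → β)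
    (hf : Function.Injective f) (xs : List α) :
    (xs.map f).toFinset.card = xs.toFinset.card := by
  have himg : (xs.map f).toFinset = xs.toFinset.image f := by
    ext b
    simp [List.mem_toFinset, Finset.mem_image]
  rw [himg, Finset.card_image_of_injective _ hf]

theorem getMaximumSubset_spec_aux (words : List String) :
    getMaximumSubset words = getMaximumSubset_alt words := by
  unfold getMaximumSubset getMaximumSubset_alt
  simp only [PySem.List.foldl_append_singleton_eq_map, List.nil_append, PySem.List.len_eq,
    PySem.List.length_sorted]
  set g : String → List Char := fun w => PySem.List.sorted w.toList (fun x => x) false with hg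
  have hA : ((PySem.Set.ofList (List.map pyStrCharList (List.map g words))).length : Int)
      = ((words.map g).toFinset.card : Int) := by
    have hnd : (PySem.Set.ofList (List.map pyStrCharList (List.map g words))).Nodup :=
      PySem.Set.nodup_ofList _
    rw [← List.toFinset_card_of_nodup hnd, toFinset_ofList,
      card_map_inj pyStrCharList pyStrCharList_inj]
  have hsorted : (PySem.List.sorted (words.map (fun w => String.ofList (g w))) (fun x => x) false).Pairwise (· ≤ ·) := by
    simpa using PySem.List.sorted_pairwise (words.map (fun w => String.ofList (g w))) (fun x => x)
  rw [pvScan_none hsorted, List.toFinset_eq_of_perm _ _ (PySem.List.sorted_perm _ _ _)]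
  have hmk : (words.map (fun w => String.ofList (g w))) = (words.map g).map String.ofList := by
    simp [List.map_map, Function.comp]
  rw [hmk, card_map_inj String.ofList (fun a b h => by simpa [String.ofList_inj] using h)]
  exact hA

-- ===== VERDICT (by name: the statement is the Claim_ definition above) =====
theorem getMaximumSubset_spec : Claim_equal_getMaximumSubset := by
  intro words _
  exact getMaximumSubset_spec_aux words
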